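-- pv_equiv track=rewrite | github.com/rs232c/FRNA | ingestors/crime_radar_ingestor.py | _classify_incident
-- ===== SOURCE A (Python) =====
-- def _classify_incident(description: str) -> str:
--     """Classify incident type based on description keywords"""
--     desc_lower = description.lower()
--
--     # Emergency medical
--     if any(word in desc_lower for word in ['medical emergency', 'patient', 'discomfort', 'suicide', 'overdose']):
--         return 'medical'
--
--     # Fire/rescue
--     elif any(word in desc_lower for word in ['fire', 'smoke', 'alarm', 'rescue', 'arson']):
--         return 'fire'
--
--     # Police/law enforcement
--     elif any(word in desc_lower for word in ['police', 'suspicious', 'burglary', 'theft', 'assault', 'domestic', 'warrant', 'arrest']):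
--         return 'police'
--
--     # Traffic/accidents
--     elif any(word in desc_lower for word in ['traffic', 'accident', 'collision', 'vehicle', 'crash', 'wreck']):
--         return 'traffic'
--
--     # Vandalism/property
--     elif any(word in desc_lower for word in ['vandalism', 'damage', 'break-in', 'trespass']):
--         return 'vandalism'
--
--     # Family/disputes
--     elif any(word in desc_lower for word in ['dispute', 'domestic', 'family', 'restraining', 'order']):
--         return 'family'
--
--     # General disturbance
--     elif any(word in desc_lower for word in ['disturbance', 'noise', 'complaint', 'harass']):
--         return 'disorderly'
--
--     # Investigation
--     elif any(word in desc_lower for word in ['investigation', 'odor', 'gas', 'unknown']):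
--         return 'investigation'
--
--     else:
--         return 'other'
-- ===== SOURCE B (Python) =====
-- _CATEGORIES = ['medical', 'fire', 'police', 'traffic', 'vandalism', 'family', 'disorderly', 'investigation']
--
-- # Flat keyword -> priority map; the chain's duplicated 'domestic' collapses to the
-- # higher-priority police group (2), which is what the chain's ordering produces anyway.
-- _KEYWORD_GROUP = {
--     'medical emergency': 0, 'patient': 0, 'discomfort': 0, 'suicide': 0, 'overdose': 0,
--     'fire': 1, 'smoke': 1, 'alarm': 1, 'rescue': 1, 'arson': 1,
--     'police': 2, 'suspicious': 2, 'burglary': 2, 'theft': 2, 'assault': 2,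
--     'domestic': 2, 'warrant': 2, 'arrest': 2,
--     'traffic': 3, 'accident': 3, 'collision': 3, 'vehicle': 3, 'crash': 3, 'wreck': 3,
--     'vandalism': 4, 'damage': 4, 'break-in': 4, 'trespass': 4,
--     'dispute': 5, 'family': 5, 'restraining': 5, 'order': 5,
--     'disturbance': 6, 'noise': 6, 'complaint': 6, 'harass': 6,
--     'investigation': 7, 'odor': 7, 'gas': 7, 'unknown': 7,
-- }
--
-- def _classify_incident(description: str) -> str:
--     """Single pass over a flat keyword table, tracking the minimal matching priority."""
--     desc = description.lower()
--     best = None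
--     for word, group in _KEYWORD_GROUP.items():
--         if word in desc and (best is None or group < best):
--             best = group
--     return 'other' if best is None else _CATEGORIES[best]
-- ===== Notes on version B (the rewrite author's own statement) =====
-- stated objective: alternative
-- what changed: Replaced the eight-branch early-return if/elif chain by one pass over a flat keyword-to-priority table that tracks the minimal matching priority and indexes a category list at the end; the keyword duplicated between the police and family groups is kept only at its higher police priority, which the chain's ordering made the effective one anyway.
import Mathlib
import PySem

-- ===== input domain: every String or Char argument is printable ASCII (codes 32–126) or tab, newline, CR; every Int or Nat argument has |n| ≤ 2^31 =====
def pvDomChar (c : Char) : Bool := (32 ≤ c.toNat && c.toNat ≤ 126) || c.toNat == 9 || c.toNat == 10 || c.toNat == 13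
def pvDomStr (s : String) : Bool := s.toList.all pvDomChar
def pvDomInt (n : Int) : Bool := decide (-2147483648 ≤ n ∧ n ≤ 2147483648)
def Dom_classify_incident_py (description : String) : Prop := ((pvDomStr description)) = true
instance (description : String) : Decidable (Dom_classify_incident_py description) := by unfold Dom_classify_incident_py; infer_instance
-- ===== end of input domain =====

-- B replaces the early-return if/elif chain by a single pass over a flat keyword→priority
-- table tracking the minimal matching priority (objective: alternative decomposition).

-- ===== PORT A =====
def classify_incident_py (description : String) : String :=
  let desc_lower := PySem.Str.lower description
  if ["medical emergency", "patient", "discomfort", "suicide", "overdose"].any (fun w => PySem.Str.isIn w desc_lower) then "medical"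
  else if ["fire", "smoke", "alarm", "rescue", "arson"].any (fun w => PySem.Str.isIn w desc_lower) then "fire"
  else if ["police", "suspicious", "burglary", "theft", "assault", "domestic", "warrant", "arrest"].any (fun w => PySem.Str.isIn w desc_lower) then "police"
  else if ["traffic", "accident", "collision", "vehicle", "crash", "wreck"].any (fun w => PySem.Str.isIn w desc_lower) then "traffic"
  else if ["vandalism", "damage", "break-in", "trespass"].any (fun w => PySem.Str.isIn w desc_lower) then "vandalism"
  else if ["dispute", "domestic", "family", "restraining", "order"].any (fun w => PySem.Str.isIn w desc_lower) then "family"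
  else if ["disturbance", "noise", "complaint", "harass"].any (fun w => PySem.Str.isIn w desc_lower) then "disorderly"
  else if ["investigation", "odor", "gas", "unknown"].any (fun w => PySem.Str.isIn w desc_lower) then "investigation"
  else "other"

-- ===== PORT B =====
def pvCategories : List String :=
  ["medical", "fire", "police", "traffic", "vandalism", "family", "disorderly", "investigation"]

-- items() of Source B's _KEYWORD_GROUP dict, in insertion order (written group by group)
def pvKeywordGroup : List (String × Nat) :=
  (["medical emergency", "patient", "discomfort", "suicide", "overdose"].map (fun w => (w, 0))) ++
  (["fire", "smoke", "alarm", "rescue", "arson"].map (fun w => (w, 1))) ++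
  (["police", "suspicious", "burglary", "theft", "assault", "domestic", "warrant", "arrest"].map (fun w => (w, 2))) ++
  (["traffic", "accident", "collision", "vehicle", "crash", "wreck"].map (fun w => (w, 3))) ++
  (["vandalism", "damage", "break-in", "trespass"].map (fun w => (w, 4))) ++
  (["dispute", "family", "restraining", "order"].map (fun w => (w, 5))) ++
  (["disturbance", "noise", "complaint", "harass"].map (fun w => (w, 6))) ++
  (["investigation", "odor", "gas", "unknown"].map (fun w => (w, 7)))

-- the loop body: `if word in desc and (best is None or group < best): best = group`
def pvStep (desc : String) (best : Option Nat) (wg : String × Nat) : Option Nat :=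
  if PySem.Str.isIn wg.1 desc && (best.isNone || decide (wg.2 < best.getD 0)) then some wg.2 else best

def classify_incident_py_alt (description : String) : String :=
  let desc := PySem.Str.lower description
  match pvKeywordGroup.foldl (pvStep desc) none with
  | none => "other"
  | some b => pvCategories.getD b "other"  -- b < 8 always, so getD is exact for _CATEGORIES[best]

-- ===== PRECONDITION & SPEC =====
def Spec_classify_incident_py (description : String) (out : String) : Prop := out = classify_incident_py_alt description
instance (description : String) (out : String) : Decidable (Spec_classify_incident_py description out) := by unfold Spec_classify_incident_py; infer_instance

-- ===== CLAIM (what is proved, stated in full; the proofs are below) =====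
def Claim_equal_classify_incident_py : Prop := ∀ (description : String), Dom_classify_incident_py description → Spec_classify_incident_py description (classify_incident_py description)

-- ===== LEMMAS AND PROOFS =====

def pvOptMin (acc : Option Nat) (g : Nat) : Nat :=
  match acc with | none => g | some b => min b g

-- folding one constant-priority segment = one any-test
lemma pvFoldl_seg (desc : String) (g : Nat) (ws : List String) (acc : Option Nat) :
    List.foldl (pvStep desc) acc (ws.map (fun w => (w, g)))
      = if ws.any (fun w => PySem.Str.isIn w desc) then some (pvOptMin acc g) else acc := by
  induction ws generalizing acc with
  | nil => simp
  | cons w ws ih =>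
    simp only [List.map_cons, List.foldl_cons, List.any_cons, pvStep]
    by_cases hw : PySem.Str.isIn w desc
    · simp only [hw, Bool.true_and, Bool.true_or]
      cases acc with
      | none =>
        simp only [Option.isNone_none, Bool.true_or, ih]
        simp [pvOptMin]
      | some b =>
        simp only [Option.isNone_some, Bool.false_or, Option.getD_some]
        by_cases hg : g < b
        · simp only [hg, decide_true, ih, pvOptMin]
          have : min g g = g := by omega
          have hbg : min b g = g := by omega
          simp [hbg]
        · have : min b g = b := by omega
          simp [hg, ih, pvOptMin, this]
    · have h2 : PySem.Str.isIn w desc = false := Bool.eq_false_iff.mpr hw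
      simp only [h2, Bool.false_and, Bool.false_or, Bool.false_eq_true, if_false, ih]

theorem classify_incident_py_spec : Claim_equal_classify_incident_py := by
  intro description _
  unfold Spec_classify_incident_py classify_incident_py classify_incident_py_alt pvKeywordGroup
  simp only [List.foldl_append, pvFoldl_seg]
  by_cases hd : PySem.Str.isIn "domestic" (PySem.Str.lower description)
  · have hpol : (["police", "suspicious", "burglary", "theft", "assault", "domestic", "warrant", "arrest"].any
        (fun w => PySem.Str.isIn w (PySem.Str.lower description))) = true := by
      simp only [List.any_cons, List.any_nil, hd, Bool.true_or, Bool.or_true, Bool.or_false]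
    rw [hpol]
    generalize (["medical emergency", "patient", "discomfort", "suicide", "overdose"].any (fun w => PySem.Str.isIn w (PySem.Str.lower description))) = a0
    generalize (["fire", "smoke", "alarm", "rescue", "arson"].any (fun w => PySem.Str.isIn w (PySem.Str.lower description))) = a1
    generalize (["traffic", "accident", "collision", "vehicle", "crash", "wreck"].any (fun w => PySem.Str.isIn w (PySem.Str.lower description))) = a3
    generalize (["vandalism", "damage", "break-in", "trespass"].any (fun w => PySem.Str.isIn w (PySem.Str.lower description))) = a4
    generalize (["dispute", "domestic", "family", "restraining", "order"].any (fun w => PySem.Str.isIn w (PySem.Str.lower description))) = a5A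
    generalize (["dispute", "family", "restraining", "order"].any (fun w => PySem.Str.isIn w (PySem.Str.lower description))) = a5
    generalize (["disturbance", "noise", "complaint", "harass"].any (fun w => PySem.Str.isIn w (PySem.Str.lower description))) = a6
    generalize (["investigation", "odor", "gas", "unknown"].any (fun w => PySem.Str.isIn w (PySem.Str.lower description))) = a7
    revert a0 a1 a3 a4 a5A a5 a6 a7
    decide
  · have hfam : (["dispute", "domestic", "family", "restraining", "order"].any
        (fun w => PySem.Str.isIn w (PySem.Str.lower description)))
      = (["dispute", "family", "restraining", "order"].any
        (fun w => PySem.Str.isIn w (PySem.Str.lower description))) := by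
      simp only [List.any_cons, List.any_nil]
      rw [(by simpa using hd : PySem.Str.isIn "domestic" (PySem.Str.lower description) = false)]
      simp
    rw [hfam]
    generalize (["medical emergency", "patient", "discomfort", "suicide", "overdose"].any (fun w => PySem.Str.isIn w (PySem.Str.lower description))) = a0
    generalize (["fire", "smoke", "alarm", "rescue", "arson"].any (fun w => PySem.Str.isIn w (PySem.Str.lower description))) = a1
    generalize (["police", "suspicious", "burglary", "theft", "assault", "domestic", "warrant", "arrest"].any (fun w => PySem.Str.isIn w (PySem.Str.lower description))) = a2
    generalize (["traffic", "accident", "collision", "vehicle", "crash", "wreck"].any (fun w => PySem.Str.isIn w (PySem.Str.lower description))) = a3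
    generalize (["vandalism", "damage", "break-in", "trespass"].any (fun w => PySem.Str.isIn w (PySem.Str.lower description))) = a4
    generalize (["dispute", "family", "restraining", "order"].any (fun w => PySem.Str.isIn w (PySem.Str.lower description))) = a5
    generalize (["disturbance", "noise", "complaint", "harass"].any (fun w => PySem.Str.isIn w (PySem.Str.lower description))) = a6
    generalize (["investigation", "odor", "gas", "unknown"].any (fun w => PySem.Str.isIn w (PySem.Str.lower description))) = a7
    revert a0 a1 a2 a3 a4 a5 a6 a7
    decide
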